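-- pv_equiv track=rewrite | github.com/DesastreNatural/advent-of-code-2023 | 11/11.py | recalculate_gravity_anomalies_directly_on
-- ===== SOURCE A (Python) =====
-- def rotate_universe(universe):
--     return [list(i) for i in zip(*universe)]
--
-- def recalculate_gravity_anomalies_directly_on(coord,universe,CORRECTION=999999):
--     h_anomaly = []
--     for i in range(len(universe)):
--         if all([j == "." for j in universe[i]]):
--             h_anomaly.append(i)
--     v_anomaly = []
--     rotated_universe = rotate_universe(universe)
--     for i in range(len(rotated_universe)):
--         if all([j == "." for j in rotated_universe[i]]):
--             v_anomaly.append(i)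
--     for g in range(len(coord)):
--         (label,(x,y)) = coord[g]
--         h_correction = [x > i for i in h_anomaly].count(True) * CORRECTION
--         v_correction = [y > i for i in v_anomaly].count(True) * CORRECTION
--         coord[g] = (label,(x+h_correction,y+v_correction))
--     return coord
-- ===== SOURCE B (Python) =====
-- def _prefix_counts(flags):
--     pref = [0]
--     run = 0
--     for f in flags:
--         if f:
--             run += 1
--         pref.append(run)
--     return pref
--
-- def recalculate_gravity_anomalies_directly_on(coord, universe, CORRECTION=999999):
--     rows = len(universe)
--     cols = min((len(r) for r in universe), default=0)
--     row_pref = _prefix_counts(all(c == "." for c in row) for row in universe)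
--     col_pref = _prefix_counts(all(row[j] == "." for row in universe) for j in range(cols))
--     for g in range(len(coord)):
--         (label, (x, y)) = coord[g]
--         h_correction = row_pref[min(max(x, 0), rows)] * CORRECTION
--         v_correction = col_pref[min(max(y, 0), cols)] * CORRECTION
--         coord[g] = (label, (x + h_correction, y + v_correction))
--     return coord
-- ===== Notes on version B (the rewrite author's own statement) =====
-- stated objective: alternative
-- what changed: Replaces A's per-coordinate rescan of the anomaly index lists by prefix-count tables (row_pref/col_pref) built in one cumulative pass, so each coordinate is corrected with two clamped table lookups instead of scanning the anomaly lists.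
import Mathlib
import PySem

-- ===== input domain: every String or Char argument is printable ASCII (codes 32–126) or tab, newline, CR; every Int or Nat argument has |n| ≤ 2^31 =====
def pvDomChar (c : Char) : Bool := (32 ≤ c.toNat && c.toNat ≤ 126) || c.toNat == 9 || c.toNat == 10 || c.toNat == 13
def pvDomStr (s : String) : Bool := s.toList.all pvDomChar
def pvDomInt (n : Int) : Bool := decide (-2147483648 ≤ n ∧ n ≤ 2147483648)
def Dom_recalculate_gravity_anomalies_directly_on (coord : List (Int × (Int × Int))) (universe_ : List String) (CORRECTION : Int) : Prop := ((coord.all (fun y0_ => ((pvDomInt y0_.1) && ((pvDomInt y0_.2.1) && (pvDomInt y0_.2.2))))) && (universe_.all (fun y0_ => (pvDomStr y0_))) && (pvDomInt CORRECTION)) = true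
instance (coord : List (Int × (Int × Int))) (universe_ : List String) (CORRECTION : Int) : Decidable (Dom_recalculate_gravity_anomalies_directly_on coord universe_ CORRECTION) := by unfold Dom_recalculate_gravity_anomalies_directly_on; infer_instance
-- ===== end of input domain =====

-- B replaces A's per-coordinate rescan of the anomaly lists by cumulative prefix-count
-- tables consulted with two clamped lookups per coordinate (objective: alternative).
-- A mutates `coord` in place; the equivalence proved here is about the RETURN value only.

-- ===== PORT A =====
-- zip(*universe): list of the columns, truncated to the shortest row (empty for no rows)
def pvRotateUniverse (uni : List (List Char)) : List (List Char) :=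
  match uni with
  | [] => []
  | r :: rs =>
      (List.range (rs.foldl (fun m s => min m s.length) r.length)).map
        (fun j => (r :: rs).map (fun s => s.getD j ' '))

def recalculate_gravity_anomalies_directly_on (coord : List (Int × (Int × Int))) (universe_ : List String) (CORRECTION : Int) : List (Int × (Int × Int)) :=
  let uni := universe_.map (fun s => s.toList)
  let h_anomaly : List Nat :=
    (List.range uni.length).foldl
      (fun acc i => if (uni.getD i []).all (fun c => c == '.') then acc ++ [i] else acc) []
  let rotated := pvRotateUniverse uni
  let v_anomaly : List Nat :=
    (List.range rotated.length).foldl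
      (fun acc i => if (rotated.getD i []).all (fun c => c == '.') then acc ++ [i] else acc) []
  coord.map (fun p =>
    let label := p.1
    let x := p.2.1
    let y := p.2.2
    let h_correction : Int := ((h_anomaly.map (fun (i : Nat) => decide (x > (i : Int)))).count true : Int) * CORRECTION
    let v_correction : Int := ((v_anomaly.map (fun (i : Nat) => decide (y > (i : Int)))).count true : Int) * CORRECTION
    (label, (x + h_correction, y + v_correction)))

-- ===== PORT B =====
-- _prefix_counts(flags): [0] followed by the running count of True flags
def pvPrefixCounts (flags : List Bool) : List Int :=
  (flags.foldl
    (fun (st : List Int × Int) f =>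
      let run := if f then st.2 + 1 else st.2
      (st.1 ++ [run], run))
    ([0], 0)).1

-- min((len(r) for r in universe), default=0)
def pvMinLen (uni : List (List Char)) : Nat :=
  match uni with
  | [] => 0
  | r :: rs => rs.foldl (fun m s => min m s.length) r.length

def recalculate_gravity_anomalies_directly_on_alt (coord : List (Int × (Int × Int))) (universe_ : List String) (CORRECTION : Int) : List (Int × (Int × Int)) :=
  let uni := universe_.map (fun s => s.toList)
  let rows := uni.length
  let cols := pvMinLen uni
  let row_pref := pvPrefixCounts (uni.map (fun row => row.all (fun c => c == '.')))
  let col_pref := pvPrefixCounts ((List.range cols).map (fun j => uni.all (fun row => row.getD j ' ' == '.')))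
  coord.map (fun p =>
    let label := p.1
    let x := p.2.1
    let y := p.2.2
    let h_correction : Int := row_pref.getD (min (max x 0) (rows : Int)).toNat 0 * CORRECTION
    let v_correction : Int := col_pref.getD (min (max y 0) (cols : Int)).toNat 0 * CORRECTION
    (label, (x + h_correction, y + v_correction)))

-- ===== PRECONDITION & SPEC =====
def Spec_recalculate_gravity_anomalies_directly_on (coord : List (Int × (Int × Int))) (universe_ : List String) (CORRECTION : Int) (out : List (Int × (Int × Int))) : Prop := out = recalculate_gravity_anomalies_directly_on_alt coord universe_ CORRECTION
instance (coord : List (Int × (Int × Int))) (universe_ : List String) (CORRECTION : Int) (out : List (Int × (Int × Int))) : Decidable (Spec_recalculate_gravity_anomalies_directly_on coord universe_ CORRECTION out) := by unfold Spec_recalculate_gravity_anomalies_directly_on; infer_instance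

-- ===== CLAIM (what is proved, stated in full; the proofs are below) =====
def Claim_equal_recalculate_gravity_anomalies_directly_on : Prop := ∀ (coord : List (Int × (Int × Int))) (universe_ : List String) (CORRECTION : Int), Dom_recalculate_gravity_anomalies_directly_on coord universe_ CORRECTION → Spec_recalculate_gravity_anomalies_directly_on coord universe_ CORRECTION (recalculate_gravity_anomalies_directly_on coord universe_ CORRECTION)

-- ===== LEMMAS AND PROOFS =====

-- running values appended by B's prefix loop after start value r
def pvDeltas (flags : List Bool) (r : Int) : List Int :=
  match flags with
  | [] => []
  | f :: fs =>
      let r' := if f then r + 1 else r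
      r' :: pvDeltas fs r'

theorem pvPrefixCounts_fold (flags : List Bool) :
    ∀ (acc : List Int) (r : Int),
      (flags.foldl
        (fun (st : List Int × Int) f =>
          let run := if f then st.2 + 1 else st.2
          (st.1 ++ [run], run))
        (acc, r)).1 = acc ++ pvDeltas flags r := by
  induction flags with
  | nil => intro acc r; simp [pvDeltas]
  | cons f fs ih =>
      intro acc r
      simp only [List.foldl_cons, pvDeltas]
      rw [ih]
      simp

theorem pvDeltas_getD (flags : List Bool) :
    ∀ (r : Int) (m : Nat), m ≤ flags.length →
      (r :: pvDeltas flags r).getD m 0 = r + ((flags.take m).count true : Int) := by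
  induction flags with
  | nil =>
      intro r m hm
      have : m = 0 := by simpa using hm
      subst this; simp
  | cons f fs ih =>
      intro r m hm
      cases m with
      | zero => simp
      | succ m' =>
          simp only [pvDeltas, List.getD_cons_succ, List.take_succ_cons, List.count_cons]
          rw [ih _ m' (by simpa using hm)]
          by_cases hf : f = true
          · simp [hf]; ring
          · simp [hf]

theorem pvPrefixCounts_getD (flags : List Bool) (m : Nat) (hm : m ≤ flags.length) :
    (pvPrefixCounts flags).getD m 0 = ((flags.take m).count true : Int) := by
  unfold pvPrefixCounts
  rw [pvPrefixCounts_fold flags [0] 0]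
  have := pvDeltas_getD flags 0 m hm
  simpa using this

-- counting 'x > i' over the filtered index list = number of accepted indices below x
theorem pvCountA (p : Nat → Bool) (x : Int) :
    ∀ n : Nat, ((List.range n).filter p).countP (fun (i : Nat) => decide (x > (i : Int)))
      = ((List.range (min n x.toNat)).filter p).length := by
  intro n
  induction n with
  | zero => simp
  | succ n ih =>
      rw [List.range_succ, List.filter_append, List.countP_append, ih]
      by_cases hlt : n < x.toNat
      · have hmin : min (n + 1) x.toNat = min n x.toNat + 1 := by omega
        have hn : min n x.toNat = n := by omega
        rw [hmin, List.range_succ, List.filter_append, List.length_append, hn]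
        have hx : (decide (x > (n : Int))) = true := by
          simp only [decide_eq_true_eq]; omega
        by_cases hp : p n = true <;> simp [hp, hx]
      · have hmin : min (n + 1) x.toNat = min n x.toNat := by omega
        rw [hmin]
        have hx : (decide (x > (n : Int))) = false := by
          simp only [decide_eq_false_iff_not]; omega
        by_cases hp : p n = true <;> simp [hp, hx]

-- the count of true flags among the first m equals the accepted indices below m
theorem pvTakeCount (flags : List Bool) :
    ∀ (p : Nat → Bool), (∀ i, i < flags.length → flags.getD i false = p i) →
      ∀ m, m ≤ flags.length →
        ((flags.take m).count true : Nat) = ((List.range m).filter p).length := by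
  induction flags with
  | nil =>
      intro p _ m hm
      have : m = 0 := by simpa using hm
      subst this; simp
  | cons f fs ih =>
      intro p hp m hm
      cases m with
      | zero => simp
      | succ m' =>
          have h0 : f = p 0 := by simpa using hp 0 (by simp)
          have hfs : ∀ i, i < fs.length → fs.getD i false = (fun i => p (i + 1)) i := by
            intro i hi
            simpa using hp (i + 1) (by simpa using Nat.succ_lt_succ hi)
          have ihm := ih (fun i => p (i + 1)) hfs m' (by simpa using hm)
          rw [List.take_succ_cons, List.count_cons, List.range_succ_eq_map,
              List.filter_cons, List.filter_map]
          by_cases hp0 : p 0 = true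
          · simp [h0, hp0, ihm, Function.comp_def]
          · simp only [Bool.not_eq_true] at hp0
            simp [h0, hp0, ihm, Function.comp_def]

-- the heart: A's scan-count equals B's clamped prefix-table lookup
theorem pvRowCount (flags : List Bool) (p : Nat → Bool)
    (hp : ∀ i, i < flags.length → flags.getD i false = p i) (x : Int) :
    ((((List.range flags.length).foldl
        (fun acc i => if p i then acc ++ [i] else acc) ([] : List Nat)).map
        (fun (i : Nat) => decide (x > (i : Int)))).count true : Int)
      = (pvPrefixCounts flags).getD (min (max x 0) ((flags.length : Nat) : Int)).toNat 0 := by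
  set n := flags.length with hn
  have hm : (min (max x 0) ((n : Nat) : Int)).toNat = min n x.toNat := by omega
  rw [hm, PySem.List.foldl_append_if_eq_filter, List.nil_append]
  rw [pvPrefixCounts_getD flags (min n x.toNat) (by omega)]
  have hcount : (((List.range n).filter p).map (fun (i : Nat) => decide (x > (i : Int)))).count true
      = ((List.range n).filter p).countP (fun (i : Nat) => decide (x > (i : Int))) := by
    simp [List.count_eq_countP, List.countP_map]; rfl
  rw [hcount, pvCountA p x n, ← pvTakeCount flags p hp (min n x.toNat) (by omega)]

theorem pvGetD_map (l : List (List Char)) (f : List Char → Bool) (i : Nat)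
    (h : i < l.length) (d : Bool) : (l.map f).getD i d = f (l.getD i []) := by
  simp [List.getD_eq_getElem?_getD, h]

theorem pvRotate_length (uni : List (List Char)) :
    (pvRotateUniverse uni).length = pvMinLen uni := by
  cases uni <;> simp [pvRotateUniverse, pvMinLen]

theorem pvCol_pred (uni : List (List Char)) (j : Nat) (hj : j < pvMinLen uni) :
    ((pvRotateUniverse uni).getD j []).all (fun c => c == '.')
      = uni.all (fun row => row.getD j ' ' == '.') := by
  cases uni with
  | nil => simp [pvMinLen] at hj
  | cons r rs =>
      simp only [pvRotateUniverse]
      rw [PySem.List.getD_map_range _ _ _ _ (by simpa [pvMinLen] using hj)]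
      simp [List.all_map, Function.comp_def]

-- ===== VERDICT (by name: the statement is the Claim_ definition above) =====
theorem recalculate_gravity_anomalies_directly_on_spec : Claim_equal_recalculate_gravity_anomalies_directly_on := by
  intro coord universe_ CORRECTION _
  unfold Spec_recalculate_gravity_anomalies_directly_on
  unfold recalculate_gravity_anomalies_directly_on recalculate_gravity_anomalies_directly_on_alt
  simp only []
  apply List.map_congr_left
  intro p _
  set uni := universe_.map (fun s => s.toList) with huni
  have hrow := pvRowCount (uni.map (fun row => row.all (fun c => c == '.')))
      (fun i => (uni.getD i []).all (fun c => c == '.'))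
      (by
        intro i hi
        exact pvGetD_map uni _ i (by simpa using hi) false) p.2.1
  have hcol := pvRowCount ((List.range (pvMinLen uni)).map
        (fun j => uni.all (fun row => row.getD j ' ' == '.')))
      (fun i => ((pvRotateUniverse uni).getD i []).all (fun c => c == '.'))
      (by
        intro i hi
        have hi' : i < pvMinLen uni := by simpa using hi
        rw [PySem.List.getD_map_range _ _ _ _ hi']
        exact (pvCol_pred uni i hi').symm) p.2.2
  simp only [List.length_map, List.length_range] at hrow hcol
  rw [← pvRotate_length uni] at hcol
  rw [hrow, hcol, pvRotate_length uni]
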